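-- pv_equiv track=rewrite | github.com/AJ730/AGUS | backend/app/fetchers/vessels.py | _check_name_prefix
-- ===== SOURCE A (Python) =====
-- from typing import Dict, List, Optional, Set, Tuple
--
-- _NAVAL_NAME_PREFIXES: Dict[str, Tuple[str, str]] = {
--     "USS ":   ("US Navy", "Warship"),
--     "USNS ":  ("US Navy", "Auxiliary"),
--     "USCGC ": ("US Coast Guard", "Patrol"),
--     "HMS ":   ("Royal Navy", "Warship"),
--     "HMCS ":  ("Royal Canadian Navy", "Warship"),
--     "HMAS ":  ("Royal Australian Navy", "Warship"),
--     "HMNZS ": ("Royal New Zealand Navy", "Warship"),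
--     "INS ":   ("Indian Navy", "Warship"),
--     "JS ":    ("JMSDF", "Warship"),
--     "KRI ":   ("Indonesian Navy", "Warship"),
--     "TCG ":   ("Turkish Navy", "Warship"),
--     "ARA ":   ("Argentine Navy", "Warship"),
--     "BNS ":   ("Bangladesh Navy", "Warship"),
--     "KD ":    ("Royal Malaysian Navy", "Warship"),
--     "HTMS ":  ("Royal Thai Navy", "Warship"),
--     "RSS ":   ("Republic of Singapore Navy", "Warship"),
--     "FS ":    ("Marine Nationale", "Warship"),
--     "FGS ":   ("Deutsche Marine", "Warship"),
--     "ITS ":   ("Marina Militare", "Warship"),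
--     "HNLMS ": ("Royal Netherlands Navy", "Warship"),
--     "ESPS ":  ("Spanish Armada", "Warship"),
--     "NRP ":   ("Portuguese Navy", "Warship"),
--     "HNoMS ": ("Royal Norwegian Navy", "Warship"),
--     "HDMS ":  ("Royal Danish Navy", "Warship"),
--     "HS ":    ("Hellenic Navy", "Warship"),
--     "ORP ":   ("Polish Navy", "Warship"),
--     "ROKS ":  ("ROKN", "Warship"),
-- }
--
-- def _check_name_prefix(name: str) -> Optional[Tuple[str, str]]:
--     """Check vessel name for known naval designation prefixes.
--
--     Args:
--         name: The vessel name from AIS data.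
--
--     Returns:
--         Tuple of (navy_name, default_vessel_class) if matched, else None.
--     """
--     if not name:
--         return None
--     name_upper = name.upper().strip()
--     for prefix, info in _NAVAL_NAME_PREFIXES.items():
--         if name_upper.startswith(prefix.upper()):
--             return info
--     return None
-- ===== SOURCE B (Python) =====
-- from typing import Optional, Tuple
--
-- # Bare-token lookup table: each naval prefix word (no trailing space) -> info.
-- _PREFIX_TABLE = {
--     "USS":   ("US Navy", "Warship"),
--     "USNS":  ("US Navy", "Auxiliary"),
--     "USCGC": ("US Coast Guard", "Patrol"),
--     "HMS":   ("Royal Navy", "Warship"),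
--     "HMCS":  ("Royal Canadian Navy", "Warship"),
--     "HMAS":  ("Royal Australian Navy", "Warship"),
--     "HMNZS": ("Royal New Zealand Navy", "Warship"),
--     "INS":   ("Indian Navy", "Warship"),
--     "JS":    ("JMSDF", "Warship"),
--     "KRI":   ("Indonesian Navy", "Warship"),
--     "TCG":   ("Turkish Navy", "Warship"),
--     "ARA":   ("Argentine Navy", "Warship"),
--     "BNS":   ("Bangladesh Navy", "Warship"),
--     "KD":    ("Royal Malaysian Navy", "Warship"),
--     "HTMS":  ("Royal Thai Navy", "Warship"),
--     "RSS":   ("Republic of Singapore Navy", "Warship"),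
--     "FS":    ("Marine Nationale", "Warship"),
--     "FGS":   ("Deutsche Marine", "Warship"),
--     "ITS":   ("Marina Militare", "Warship"),
--     "HNLMS": ("Royal Netherlands Navy", "Warship"),
--     "ESPS":  ("Spanish Armada", "Warship"),
--     "NRP":   ("Portuguese Navy", "Warship"),
--     "HNOMS": ("Royal Norwegian Navy", "Warship"),
--     "HDMS":  ("Royal Danish Navy", "Warship"),
--     "HS":    ("Hellenic Navy", "Warship"),
--     "ORP":   ("Polish Navy", "Warship"),
--     "ROKS":  ("ROKN", "Warship"),
-- }
--
-- def _check_name_prefix(name: str) -> Optional[Tuple[str, str]]: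
--     """Check vessel name for known naval designation prefixes."""
--     if not name:
--         return None
--     s = name.upper().strip()
--     i = s.find(" ")
--     if i == -1:
--         return None
--     return _PREFIX_TABLE.get(s[:i])
-- ===== Notes on version B (the rewrite author's own statement) =====
-- stated objective: idiomatic
-- what changed: Replaces the linear startswith-scan over 28 prefixes with a single hash lookup: split the normalized name at its first space and look the leading token up in a module-level dict keyed by the bare uppercased prefix words.
import Mathlib
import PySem

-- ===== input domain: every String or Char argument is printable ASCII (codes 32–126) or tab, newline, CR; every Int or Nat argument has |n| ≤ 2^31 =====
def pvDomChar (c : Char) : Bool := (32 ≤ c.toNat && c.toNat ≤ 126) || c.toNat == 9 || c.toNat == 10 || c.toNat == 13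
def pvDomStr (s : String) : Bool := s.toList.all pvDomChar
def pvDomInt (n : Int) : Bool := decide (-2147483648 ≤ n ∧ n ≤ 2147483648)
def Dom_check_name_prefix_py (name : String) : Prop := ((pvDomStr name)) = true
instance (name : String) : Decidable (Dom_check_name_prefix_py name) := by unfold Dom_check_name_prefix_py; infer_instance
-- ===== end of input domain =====

-- B replaces A's linear startswith-scan over the prefix list by one hash lookup of the
-- token before the first space (idiomatic; same results on every input).

-- ===== PORT A =====
def navalNamePrefixes : List (String × String × String) :=
  [("USS ", "US Navy", "Warship"),
   ("USNS ", "US Navy", "Auxiliary"),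
   ("USCGC ", "US Coast Guard", "Patrol"),
   ("HMS ", "Royal Navy", "Warship"),
   ("HMCS ", "Royal Canadian Navy", "Warship"),
   ("HMAS ", "Royal Australian Navy", "Warship"),
   ("HMNZS ", "Royal New Zealand Navy", "Warship"),
   ("INS ", "Indian Navy", "Warship"),
   ("JS ", "JMSDF", "Warship"),
   ("KRI ", "Indonesian Navy", "Warship"),
   ("TCG ", "Turkish Navy", "Warship"),
   ("ARA ", "Argentine Navy", "Warship"),
   ("BNS ", "Bangladesh Navy", "Warship"),
   ("KD ", "Royal Malaysian Navy", "Warship"),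
   ("HTMS ", "Royal Thai Navy", "Warship"),
   ("RSS ", "Republic of Singapore Navy", "Warship"),
   ("FS ", "Marine Nationale", "Warship"),
   ("FGS ", "Deutsche Marine", "Warship"),
   ("ITS ", "Marina Militare", "Warship"),
   ("HNLMS ", "Royal Netherlands Navy", "Warship"),
   ("ESPS ", "Spanish Armada", "Warship"),
   ("NRP ", "Portuguese Navy", "Warship"),
   ("HNoMS ", "Royal Norwegian Navy", "Warship"),
   ("HDMS ", "Royal Danish Navy", "Warship"),
   ("HS ", "Hellenic Navy", "Warship"),
   ("ORP ", "Polish Navy", "Warship"),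
   ("ROKS ", "ROKN", "Warship")]

-- the for-loop with early return, over the (prefix, info) items
def checkLoopA (nameUpper : List Char) : List (String × String × String) → Option (String × String)
  | [] => none
  | (p, navy, cls) :: rest =>
      if PySem.Chars.startswith nameUpper (PySem.Str.upper p).toList then some (navy, cls)
      else checkLoopA nameUpper rest

def check_name_prefix_py (name : String) : Option (String × String) :=
  if PySem.Str.len name = 0 then none
  else checkLoopA (PySem.Str.strip (PySem.Str.upper name)).toList navalNamePrefixes

-- ===== PORT B =====
def prefixTable : PySem.Dict (List Char) (String × String) :=
  PySem.Dict.ofList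
  [("USS".toList, ("US Navy", "Warship")),
   ("USNS".toList, ("US Navy", "Auxiliary")),
   ("USCGC".toList, ("US Coast Guard", "Patrol")),
   ("HMS".toList, ("Royal Navy", "Warship")),
   ("HMCS".toList, ("Royal Canadian Navy", "Warship")),
   ("HMAS".toList, ("Royal Australian Navy", "Warship")),
   ("HMNZS".toList, ("Royal New Zealand Navy", "Warship")),
   ("INS".toList, ("Indian Navy", "Warship")),
   ("JS".toList, ("JMSDF", "Warship")),
   ("KRI".toList, ("Indonesian Navy", "Warship")),
   ("TCG".toList, ("Turkish Navy", "Warship")),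
   ("ARA".toList, ("Argentine Navy", "Warship")),
   ("BNS".toList, ("Bangladesh Navy", "Warship")),
   ("KD".toList, ("Royal Malaysian Navy", "Warship")),
   ("HTMS".toList, ("Royal Thai Navy", "Warship")),
   ("RSS".toList, ("Republic of Singapore Navy", "Warship")),
   ("FS".toList, ("Marine Nationale", "Warship")),
   ("FGS".toList, ("Deutsche Marine", "Warship")),
   ("ITS".toList, ("Marina Militare", "Warship")),
   ("HNLMS".toList, ("Royal Netherlands Navy", "Warship")),
   ("ESPS".toList, ("Spanish Armada", "Warship")),
   ("NRP".toList, ("Portuguese Navy", "Warship")),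
   ("HNOMS".toList, ("Royal Norwegian Navy", "Warship")),
   ("HDMS".toList, ("Royal Danish Navy", "Warship")),
   ("HS".toList, ("Hellenic Navy", "Warship")),
   ("ORP".toList, ("Polish Navy", "Warship")),
   ("ROKS".toList, ("ROKN", "Warship"))]

def check_name_prefix_py_alt (name : String) : Option (String × String) :=
  if PySem.Str.len name = 0 then none
  else
    let s := (PySem.Str.strip (PySem.Str.upper name)).toList
    let i := PySem.Chars.find s [' ']
    if i = -1 then none
    else PySem.Dict.get? prefixTable (PySem.List.slice s none (some i))

-- ===== PRECONDITION & SPEC =====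
def Spec_check_name_prefix_py (name : String) (out : Option (String × String)) : Prop := out = check_name_prefix_py_alt name
instance (name : String) (out : Option (String × String)) : Decidable (Spec_check_name_prefix_py name out) := by unfold Spec_check_name_prefix_py; infer_instance

-- ===== CLAIM (what is proved, stated in full; the proofs are below) =====
def Claim_equal_check_name_prefix_py : Prop := ∀ (name : String), Dom_check_name_prefix_py name → Spec_check_name_prefix_py name (check_name_prefix_py name)

-- ===== LEMMAS AND PROOFS =====

-- the B-table as a plain association list (proof-side view of prefixTable)
def tableB : List ((List Char) × String × String) :=
  [("USS".toList, ("US Navy", "Warship")),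
   ("USNS".toList, ("US Navy", "Auxiliary")),
   ("USCGC".toList, ("US Coast Guard", "Patrol")),
   ("HMS".toList, ("Royal Navy", "Warship")),
   ("HMCS".toList, ("Royal Canadian Navy", "Warship")),
   ("HMAS".toList, ("Royal Australian Navy", "Warship")),
   ("HMNZS".toList, ("Royal New Zealand Navy", "Warship")),
   ("INS".toList, ("Indian Navy", "Warship")),
   ("JS".toList, ("JMSDF", "Warship")),
   ("KRI".toList, ("Indonesian Navy", "Warship")),
   ("TCG".toList, ("Turkish Navy", "Warship")),
   ("ARA".toList, ("Argentine Navy", "Warship")),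
   ("BNS".toList, ("Bangladesh Navy", "Warship")),
   ("KD".toList, ("Royal Malaysian Navy", "Warship")),
   ("HTMS".toList, ("Royal Thai Navy", "Warship")),
   ("RSS".toList, ("Republic of Singapore Navy", "Warship")),
   ("FS".toList, ("Marine Nationale", "Warship")),
   ("FGS".toList, ("Deutsche Marine", "Warship")),
   ("ITS".toList, ("Marina Militare", "Warship")),
   ("HNLMS".toList, ("Royal Netherlands Navy", "Warship")),
   ("ESPS".toList, ("Spanish Armada", "Warship")),
   ("NRP".toList, ("Portuguese Navy", "Warship")),
   ("HNOMS".toList, ("Royal Norwegian Navy", "Warship")),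
   ("HDMS".toList, ("Royal Danish Navy", "Warship")),
   ("HS".toList, ("Hellenic Navy", "Warship")),
   ("ORP".toList, ("Polish Navy", "Warship")),
   ("ROKS".toList, ("ROKN", "Warship"))]

-- relation between an A-entry and its B-table entry
def entRel (e : String × String × String) (k : (List Char) × String × String) : Prop :=
  (PySem.Str.upper e.1).toList = k.1 ++ [' '] ∧ ' ' ∉ k.1 ∧ e.2 = k.2

lemma prefix_append_space_iff (k r : List Char) :
    ∀ (t : List Char), ' ' ∉ k → ' ' ∉ t → ((k ++ [' ']) <+: (t ++ ' ' :: r) ↔ k = t) := by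
  induction k with
  | nil =>
      intro t _ ht
      cases t with
      | nil => simp
      | cons c t' =>
        have hc : c ≠ ' ' := fun h => ht (by simp [h])
        simp only [List.nil_append, List.cons_append, List.cons_prefix_cons]
        constructor
        · rintro ⟨h1, -⟩; exact absurd h1.symm hc
        · intro h; simp at h
  | cons c k' ih =>
      intro t hk ht
      cases t with
      | nil =>
        have hc : c ≠ ' ' := fun h => hk (by simp [h])
        simp only [List.nil_append, List.cons_append, List.cons_prefix_cons]
        constructor
        · rintro ⟨h1, -⟩; exact absurd h1 hc
        · intro h; simp at h
      | cons d t' =>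
        have hk' : ' ' ∉ k' := fun h => hk (List.mem_cons_of_mem _ h)
        have ht' : ' ' ∉ t' := fun h => ht (List.mem_cons_of_mem _ h)
        simp only [List.cons_append, List.cons_prefix_cons]
        rw [ih t' hk' ht']
        constructor
        · rintro ⟨h1, h2⟩; rw [h1, h2]
        · intro h; injection h with h1 h2; exact ⟨h1, h2⟩

lemma startswith_token (k t r : List Char) (hk : ' ' ∉ k) (ht : ' ' ∉ t) :
    PySem.Chars.startswith (t ++ ' ' :: r) (k ++ [' ']) = decide (k = t) := by
  have hiff := prefix_append_space_iff k r t hk ht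
  by_cases h : k = t
  · have := (PySem.Chars.startswith_iff (t ++ ' ' :: r) (k ++ [' '])).mpr (hiff.mpr h)
    subst h; simp [this]
  · have hfalse : PySem.Chars.startswith (t ++ ' ' :: r) (k ++ [' ']) = false := by
      rw [Bool.eq_false_iff]
      intro hs
      exact h (hiff.mp ((PySem.Chars.startswith_iff _ _).mp hs))
    simp [hfalse, h]

lemma loopA_none (cs : List Char) (h : ' ' ∉ cs) :
    ∀ es : List (String × String × String), (∀ e ∈ es, ' ' ∈ (PySem.Str.upper e.1).toList) →
    checkLoopA cs es = none := by
  intro es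
  induction es with
  | nil => intro _; rfl
  | cons e rest ih =>
      intro hall
      have hsp : ' ' ∈ (PySem.Str.upper e.1).toList := hall e (by simp)
      have hfalse : PySem.Chars.startswith cs (PySem.Str.upper e.1).toList = false := by
        rw [Bool.eq_false_iff]
        intro hs
        exact h (((PySem.Chars.startswith_iff _ _).mp hs).subset hsp)
      rw [checkLoopA, hfalse]
      simp only [Bool.false_eq_true, if_false]
      exact ih (fun e' he' => hall e' (List.mem_cons_of_mem _ he'))

lemma loopA_lookup (t r : List Char) (ht : ' ' ∉ t)
    (es : List (String × String × String)) (ks : List ((List Char) × String × String))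
    (hrel : List.Forall₂ entRel es ks) :
    checkLoopA (t ++ ' ' :: r) es =
      Option.map (fun x => x.2) (List.find? (fun p => p.1 == t) ks) := by
  induction hrel with
  | nil => rfl
  | @cons e k es' ks' hek htail ih =>
      obtain ⟨h1, h2, h3⟩ := hek
      rw [checkLoopA, h1, startswith_token k.1 t r h2 ht]
      by_cases hkt : k.1 = t
      · rw [List.find?_cons_of_pos (by simp [hkt])]
        simp [hkt, h3]
      · rw [List.find?_cons_of_neg (by simp [hkt])]
        simp only [hkt, decide_false, Bool.false_eq_true, if_false]
        exact ih

lemma table_rel : List.Forall₂ entRel navalNamePrefixes tableB := by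
  unfold navalNamePrefixes tableB entRel
  repeat refine List.Forall₂.cons ⟨by decide, by decide, rfl⟩ ?_
  exact List.Forall₂.nil

lemma table_items : prefixTable.items = tableB := by decide

lemma all_have_space : ∀ e ∈ navalNamePrefixes, ' ' ∈ (PySem.Str.upper e.1).toList := by decide

lemma main_lemma (cs : List Char) :
    checkLoopA cs navalNamePrefixes =
      (if PySem.Chars.find cs [' '] = -1 then none
       else PySem.Dict.get? prefixTable (PySem.List.slice cs none (some (PySem.Chars.find cs [' '])))) := by
  by_cases hfind : PySem.Chars.find cs [' '] = -1
  · rw [if_pos hfind]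
    have hns : ' ' ∉ cs := by
      intro hmem
      exact ((PySem.Chars.find_eq_neg_one_iff cs [' ']).mp hfind)
        ((List.singleton_infix_iff ' ' cs).mpr hmem)
    exact loopA_none cs hns navalNamePrefixes all_have_space
  · rw [if_neg hfind]
    have hge : 0 ≤ PySem.Chars.find cs [' '] := by
      have := PySem.Chars.neg_one_le_find cs [' ']
      omega
    set i := PySem.Chars.find cs [' '] with hi
    set n := i.toNat with hn
    have hin : i = (n : Int) := by omega
    have hnlen : n ≤ cs.length := by
      have := PySem.Chars.find_le_length cs [' ']
      omega
    obtain ⟨hpre, hmin⟩ := PySem.Chars.find_spec (sub := [' ']) hge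
    -- cs.drop n starts with a space
    obtain ⟨r, hdrop⟩ : ∃ r, cs.drop n = ' ' :: r := by
      cases hd : cs.drop n with
      | nil => rw [← hi, ← hn, hd] at hpre; simp at hpre
      | cons a l =>
          rw [← hi, ← hn, hd] at hpre
          obtain ⟨ha, -⟩ := List.cons_prefix_cons.mp hpre
          exact ⟨l, by rw [← ha]⟩
    -- no space before position n
    have htake : ' ' ∉ cs.take n := by
      intro hmem
      obtain ⟨j, hj, hje⟩ := List.getElem_of_mem hmem
      have hjn : j < n := by
        have := hj; simp [List.length_take] at this; omega
      have hjl : j < cs.length := by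
        have := hj; simp [List.length_take] at this; omega
      have hjc : cs[j] = ' ' := by rw [← List.getElem_take (h := hj)] at *; exact hje
      refine hmin j (by rw [← hi, ← hn]; exact hjn) ?_
      rw [List.drop_eq_getElem_cons hjl, hjc]
      simp
    have hsplit : cs.take n ++ ' ' :: r = cs := by
      rw [← hdrop]; exact List.take_append_drop n cs
    rw [PySem.Dict.get?, table_items, hin, PySem.List.slice_to cs (by omega), Int.toNat_natCast]
    conv_lhs => rw [← hsplit]
    exact loopA_lookup (cs.take n) r htake navalNamePrefixes tableB table_rel

-- ===== VERDICT (by name: the statement is the Claim_ definition above) =====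
theorem check_name_prefix_py_spec : Claim_equal_check_name_prefix_py := by
  intro name _
  unfold Spec_check_name_prefix_py check_name_prefix_py check_name_prefix_py_alt
  by_cases hlen : PySem.Str.len name = 0
  · rw [if_pos hlen, if_pos hlen]
  · rw [if_neg hlen, if_neg hlen]
    exact main_lemma ((PySem.Str.strip (PySem.Str.upper name)).toList)
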